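-- pv_equiv track=rewrite | github.com/Arhisan/FBB-LIB | FlaskFBBot/FBBlib/AirlineBoardingPass.py | remove_empty_values
-- ===== SOURCE A (Python) =====
-- def remove_empty_values(d):
--     removeList = [];
--     for key, value in d.items():
--         if value == "":
--             removeList.append(key)
--     for key in removeList:
--         del d[key]
--     return d
-- ===== SOURCE B (Python) =====
-- def remove_empty_values(d):
--     kept = {k: v for k, v in d.items() if v != ""}
--     d.clear()
--     d.update(kept)
--     return d
-- ===== Notes on version B (the rewrite author's own statement) =====
-- stated objective: simpler
-- what changed: B builds the kept entries with a single dict comprehension and reinstalls them via clear()+update(), replacing A's two-phase collect-keys-then-delete loops.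
import Mathlib
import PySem

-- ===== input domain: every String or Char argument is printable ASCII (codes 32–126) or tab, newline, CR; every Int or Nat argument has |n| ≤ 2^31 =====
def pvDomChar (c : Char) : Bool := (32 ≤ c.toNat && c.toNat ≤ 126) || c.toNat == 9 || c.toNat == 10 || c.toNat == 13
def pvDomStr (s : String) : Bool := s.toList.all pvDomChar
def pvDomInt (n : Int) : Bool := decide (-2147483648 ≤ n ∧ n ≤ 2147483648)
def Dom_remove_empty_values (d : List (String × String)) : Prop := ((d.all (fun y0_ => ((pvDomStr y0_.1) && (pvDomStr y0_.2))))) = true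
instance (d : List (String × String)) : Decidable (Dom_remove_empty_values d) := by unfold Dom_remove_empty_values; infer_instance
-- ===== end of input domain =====

-- B changes the structure only: one dict comprehension plus clear()/update() instead of A's
-- collect-keys-then-delete pair of loops; same in-place mutation, same returned contents, same cost.

-- ===== PORT A =====
-- `del d[key]`: remove the entry with this key (first occurrence; a dict has unique keys)
def pyDelKey (d : List (String × String)) (k : String) : List (String × String) :=
  match d with
  | [] => []
  | p :: rest => if p.1 = k then rest else p :: pyDelKey rest k

def remove_empty_values (d : List (String × String)) : List (String × String) :=
  let removeList := d.foldl (fun acc kv => if kv.2 = "" then acc ++ [kv.1] else acc) ([] : List String)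
  removeList.foldl pyDelKey d

-- ===== PORT B =====
-- `{k: v for k, v in d.items() if v != ""}`, then clear()+update() makes this d's new contents
def remove_empty_values_alt (d : List (String × String)) : List (String × String) :=
  d.filter (fun kv => !(kv.2 == ""))

-- ===== PRECONDITION & SPEC =====
-- Pre_ states the dict representation invariant: keys are distinct (always true for a Python dict,
-- so no input A accepts is excluded).
def Pre_remove_empty_values (d : List (String × String)) : Prop := (d.map Prod.fst).Nodup
instance (d : List (String × String)) : Decidable (Pre_remove_empty_values d) := by unfold Pre_remove_empty_values; infer_instance

def pvWitness_remove_empty_values : (List (String × String)) := [("a", ""), ("b", "x"), ("c", "")]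

def Spec_remove_empty_values (d : List (String × String)) (out : List (String × String)) : Prop := out = remove_empty_values_alt d
instance (d : List (String × String)) (out : List (String × String)) : Decidable (Spec_remove_empty_values d out) := by unfold Spec_remove_empty_values; infer_instance

-- ===== CLAIM (what is proved, stated in full; the proofs are below) =====
def Claim_equal_remove_empty_values : Prop := ∀ (d : List (String × String)), Dom_remove_empty_values d → Pre_remove_empty_values d → Spec_remove_empty_values d (remove_empty_values d)

-- ===== LEMMAS AND PROOFS =====

-- with distinct keys, `del d[k]` is the same as filtering k out
theorem pyDelKey_eq_filter (d : List (String × String)) (k : String)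
    (h : (d.map Prod.fst).Nodup) :
    pyDelKey d k = d.filter (fun kv => !(kv.1 == k)) := by
  induction d with
  | nil => rfl
  | cons p rest ih =>
    simp only [List.map_cons, List.nodup_cons] at h
    by_cases hk : p.1 = k
    · rw [pyDelKey, if_pos hk, List.filter_cons, if_neg (by simp [hk])]
      exact (List.filter_eq_self.2 (fun q hq => by
        simp only [Bool.not_eq_true', beq_eq_false_iff_ne, ne_eq]
        intro hq1
        exact h.1 ((hq1.trans hk.symm) ▸ List.mem_map_of_mem hq))).symm
    · simp only [pyDelKey, if_neg hk, List.filter_cons, ih h.2]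
      simp [hk]

theorem foldl_pyDelKey_eq_filter (ks : List String) (d : List (String × String))
    (h : (d.map Prod.fst).Nodup) :
    ks.foldl pyDelKey d = d.filter (fun kv => !(ks.contains kv.1)) := by
  induction ks generalizing d with
  | nil => simp
  | cons k ks ih =>
    simp only [List.foldl_cons]
    rw [pyDelKey_eq_filter d k h, ih, List.filter_filter]
    · apply List.filter_congr
      intro kv _
      by_cases hkk : kv.1 = k <;> simp [hkk, Bool.and_comm]
    · exact (List.Sublist.map _ List.filter_sublist).nodup h

theorem removeList_eq (d : List (String × String)) (acc : List String) :
    d.foldl (fun acc kv => if kv.2 = "" then acc ++ [kv.1] else acc) acc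
      = acc ++ (d.filter (fun kv => kv.2 == "")).map Prod.fst := by
  induction d generalizing acc with
  | nil => simp
  | cons p rest ih =>
    simp only [List.foldl_cons, List.filter_cons]
    by_cases hp : p.2 = ""
    · simp [hp, ih]
    · simp [hp, ih]

-- in a list with distinct keys, equal keys force equal pairs
theorem key_inj (d : List (String × String)) (h : (d.map Prod.fst).Nodup)
    {p q : String × String} (hp : p ∈ d) (hq : q ∈ d) (hk : p.1 = q.1) : p = q :=
  List.inj_on_of_nodup_map h hp hq hk

-- ===== VERDICT (by name: the statement is the Claim_ definition above) =====
theorem remove_empty_values_spec : Claim_equal_remove_empty_values := by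
  intro d _ hpre
  unfold Spec_remove_empty_values remove_empty_values remove_empty_values_alt
  rw [removeList_eq d [], List.nil_append, foldl_pyDelKey_eq_filter _ d hpre]
  apply List.filter_congr
  intro kv hkv
  by_cases he : kv.2 = ""
  · have hm : kv.1 ∈ ((d.filter (fun kv => kv.2 == "")).map Prod.fst) :=
      List.mem_map_of_mem (List.mem_filter.2 ⟨hkv, by simp [he]⟩)
    simp [List.contains_eq_mem, hm, he]
  · have hm : kv.1 ∉ ((d.filter (fun kv => kv.2 == "")).map Prod.fst) := by
      intro hm
      obtain ⟨q, hq, hqk⟩ := List.mem_map.1 hm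
      have hq' := List.mem_filter.1 hq
      have heq := key_inj d hpre hq'.1 hkv hqk
      have h2 := hq'.2
      simp only [beq_iff_eq] at h2
      exact he (heq ▸ h2)
    simp [List.contains_eq_mem, hm, he]
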